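-- pv_equiv track=rewrite | github.com/ljy21123/DEU-Capstone-I | calculator.py | aggregate_height
-- ===== SOURCE A (Python) =====
-- def aggregate_height(field: int):
--     result = 0
--
--     # 필드의 가로 넓이 만큼 반복
--     for x in range(1, len(field[0]) - 1):
--         # 해당 열의 높이 0 부터 처음 블록이 나올때 까지 빈 공간 개수
--         void_count = 0
--         # 필드의 높이 만큼 반복
--         for y in range(len(field) - 1):
--             # 빈 공간이라면 카운트 +1
--             if field[y][x] == 0:
--                 void_count += 1
--             # 블록을 만났다면
--             else:
--                 break
--         # 전체 높이 - 빈공간 개수 - 바닥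
--         result += len(field) - void_count - 1
--
--     return result
-- ===== SOURCE B (Python) =====
-- def aggregate_height(field):
--     # Row-major sweep: keep the list of interior columns that have not yet
--     # hit a block; when a column settles at row y it contributes len(field)-y-1.
--     remaining = list(range(1, len(field[0]) - 1))
--     weight = len(field) - 1
--     result = 0
--     for row in field[:-1]:
--         if not remaining:
--             break
--         still = [x for x in remaining if row[x] == 0]
--         result += (len(remaining) - len(still)) * weight
--         remaining = still
--         weight -= 1
--     return result
-- ===== Notes on version B (the rewrite author's own statement) =====
-- stated objective: alternative
-- what changed: Inverted the traversal: instead of scanning each interior column top-down with an early break, B sweeps the rows once top to bottom while maintaining the list of still-open columns, adding len(field)-y-1 when a column first hits a block.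
import Mathlib
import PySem

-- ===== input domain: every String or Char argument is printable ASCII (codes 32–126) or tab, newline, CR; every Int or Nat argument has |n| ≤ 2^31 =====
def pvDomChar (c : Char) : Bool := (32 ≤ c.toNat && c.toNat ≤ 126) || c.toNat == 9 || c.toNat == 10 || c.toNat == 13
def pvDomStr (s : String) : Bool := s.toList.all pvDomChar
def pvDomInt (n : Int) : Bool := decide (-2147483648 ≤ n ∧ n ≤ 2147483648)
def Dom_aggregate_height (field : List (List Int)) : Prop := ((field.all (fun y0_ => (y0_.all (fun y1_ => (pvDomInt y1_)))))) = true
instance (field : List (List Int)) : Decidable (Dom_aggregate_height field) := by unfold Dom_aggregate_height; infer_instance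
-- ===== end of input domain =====

-- B sweeps the rows once top to bottom keeping the list of still-open interior columns,
-- instead of A's column-by-column top-down scan with an early break (objective: alternative).

-- ===== PORT A =====
-- inner loop of A: count zeros in column x from the top row down, stop at the first block
def voidCount (rows : List (List Int)) (x : Int) : Int :=
  match rows with
  | [] => 0
  | r :: rs => if (PySem.List.pyGet? r x).getD 0 == 0 then 1 + voidCount rs x else 0

def aggregate_height (field : List (List Int)) : Int :=
  let w : Int := (((PySem.List.pyGet? field 0).getD []).length : Int)
  let h : Int := (field.length : Int)
  -- 'for y in range(len(field)-1)' visits exactly the rows field[:-1] = field.dropLast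
  (PySem.List.pyRange 1 (w - 1) 1).foldl
    (fun result x => result + (h - voidCount field.dropLast x - 1)) 0

-- ===== PORT B =====
-- B's row loop: 'still' are the columns of 'remaining' that are still empty in this row
def altLoop (rows : List (List Int)) (weight : Int) (remaining : List Int) (result : Int) : Int :=
  match rows with
  | [] => result
  | row :: rest =>
    if remaining.isEmpty then result
    else
      let still := remaining.filter (fun x => (PySem.List.pyGet? row x).getD 0 == 0)
      altLoop rest (weight - 1) still
        (result + ((remaining.length : Int) - (still.length : Int)) * weight)

def aggregate_height_alt (field : List (List Int)) : Int :=
  let remaining : List Int :=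
    PySem.List.pyRange 1 ((((PySem.List.pyGet? field 0).getD []).length : Int) - 1) 1
  altLoop field.dropLast ((field.length : Int) - 1) remaining 0

-- ===== PRECONDITION & SPEC =====
-- Pre_ excludes exactly the inputs on which A raises IndexError: the empty field, and ragged
-- fields where the top-down scan of some interior column x reaches a non-last row shorter
-- than x without a block in that column strictly above stopping the scan first.
def Pre_aggregate_height (field : List (List Int)) : Prop :=
  field ≠ [] ∧
  ∀ y ∈ List.range (field.length - 1), ∀ x ∈ List.range ((field.headD []).length),
    1 ≤ x → x + 1 < (field.headD []).length → (field.getD y []).length ≤ x →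
      ∃ y' ∈ List.range y, (field.getD y' []).getD x 0 ≠ 0
instance (field : List (List Int)) : Decidable (Pre_aggregate_height field) := by
  unfold Pre_aggregate_height; infer_instance

def pvWitness_aggregate_height : List (List Int) := [[0, 0, 0], [0, 1, 0], [1, 1, 1]]

def Spec_aggregate_height (field : List (List Int)) (out : Int) : Prop := out = aggregate_height_alt field
instance (field : List (List Int)) (out : Int) : Decidable (Spec_aggregate_height field out) := by unfold Spec_aggregate_height; infer_instance

-- ===== CLAIM (what is proved, stated in full; the proofs are below) =====
def Claim_equal_aggregate_height : Prop := ∀ (field : List (List Int)), Dom_aggregate_height field → Pre_aggregate_height field → Spec_aggregate_height field (aggregate_height field)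

-- ===== LEMMAS AND PROOFS =====

-- contribution of column x to the total when the remaining weight at the current row is w
def contrib (rows : List (List Int)) (w : Int) (x : Int) : Int :=
  match rows with
  | [] => 0
  | row :: rest => if (PySem.List.pyGet? row x).getD 0 == 0 then contrib rest (w - 1) x else w

theorem sum_map_ite_split (R : List Int) (p : Int → Bool) (g : Int → Int) (w : Int) :
    (R.map (fun x => if p x then g x else w)).sum
      = ((R.length : Int) - ((R.filter p).length : Int)) * w + ((R.filter p).map g).sum := by
  induction R with
  | nil => simp
  | cons a R ih =>
    by_cases h : p a = true
    · simp [h, ih]; ring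
    · simp at h
      simp [h, ih]; ring

theorem altLoop_eq_sum (rows : List (List Int)) :
    ∀ (w : Int) (R : List Int) (r : Int),
      altLoop rows w R r = r + (R.map (contrib rows w)).sum := by
  induction rows with
  | nil =>
    intro w R r
    simp [altLoop, contrib]
  | cons row rest ih =>
    intro w R r
    by_cases hR : R.isEmpty
    · rw [List.isEmpty_iff] at hR
      subst hR
      simp [altLoop]
    · rw [altLoop, if_neg hR]
      rw [ih]
      rw [show (R.map (contrib (row :: rest) w)).sum
            = (R.map (fun x => if (PySem.List.pyGet? row x).getD 0 == 0
                then contrib rest (w - 1) x else w)).sum from rfl]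
      rw [sum_map_ite_split R _ (contrib rest (w - 1)) w]
      ring

theorem contrib_eq_voidCount (rows : List (List Int)) (x : Int) :
    contrib rows (rows.length : Int) x = (rows.length : Int) - voidCount rows x := by
  induction rows with
  | nil => simp [contrib, voidCount]
  | cons r rs ih =>
    by_cases h : ((PySem.List.pyGet? r x).getD 0 == 0) = true
    · rw [contrib, voidCount]
      simp only [h, if_true]
      have : ((r :: rs).length : Int) - 1 = (rs.length : Int) := by simp
      rw [this, ih]
      simp only [List.length_cons]
      push_cast
      ring
    · simp only [Bool.not_eq_true] at h
      rw [contrib, voidCount]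
      simp [h]

theorem foldl_add_int (l : List Int) (f : Int → Int) :
    ∀ (a : Int), l.foldl (fun acc x => acc + f x) a = a + (l.map f).sum := by
  induction l with
  | nil => intro a; simp
  | cons x xs ih => intro a; simp [List.foldl_cons, ih]; ring

theorem ports_agree (field : List (List Int)) (hne : field ≠ []) :
    aggregate_height field = aggregate_height_alt field := by
  unfold aggregate_height aggregate_height_alt
  rw [foldl_add_int, altLoop_eq_sum]
  have hlen : (field.dropLast.length : Int) = (field.length : Int) - 1 := by
    rw [List.length_dropLast]
    have : 1 ≤ field.length := List.length_pos_iff.mpr hne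
    omega
  congr 1
  apply congrArg List.sum
  apply List.map_congr_left
  intro x _
  rw [← hlen, contrib_eq_voidCount]
  rw [hlen]
  ring

-- ===== VERDICT (by name: the statement is the Claim_ definition above) =====
theorem aggregate_height_spec : Claim_equal_aggregate_height := by
  intro field _ hpre
  unfold Spec_aggregate_height
  exact ports_agree field hpre.1
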